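-- pv_equiv track=rewrite | github.com/obss/sahi | sahi/utils/cv.py | get_bbox_from_coco_segmentation
-- ===== SOURCE A (Python) =====
-- def get_bbox_from_coco_segmentation(coco_segmentation):
--     """Generate voc box ([xmin, ymin, xmax, ymax]) from given coco segmentation."""
--     xs = []
--     ys = []
--     for segm in coco_segmentation:
--         xs.extend(segm[::2])
--         ys.extend(segm[1::2])
--     if len(xs) == 0 or len(ys) == 0:
--         return None
--     xmin = min(xs)
--     xmax = max(xs)
--     ymin = min(ys)
--     ymax = max(ys)
--     return [xmin, ymin, xmax, ymax]
-- ===== SOURCE B (Python) =====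
-- def get_bbox_from_coco_segmentation(coco_segmentation):
--     """Single streaming pass with running min/max; no intermediate coordinate lists."""
--     xmin = xmax = ymin = ymax = None
--     for segm in coco_segmentation:
--         x_turn = True
--         for v in segm:
--             if x_turn:
--                 if xmin is None or v < xmin:
--                     xmin = v
--                 if xmax is None or v > xmax:
--                     xmax = v
--             else:
--                 if ymin is None or v < ymin:
--                     ymin = v
--                 if ymax is None or v > ymax:
--                     ymax = v
--             x_turn = not x_turn
--     if xmin is None or ymin is None:
--         return None
--     return [xmin, ymin, xmax, ymax]
-- ===== Notes on version B (the rewrite author's own statement) =====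
-- stated objective: alternative
-- what changed: Instead of materialising the x- and y-coordinate lists via slicing and then taking min/max of each list, B streams every coordinate once, keeping four running extrema (as None-initialised accumulators) and a parity flag per segment, so no intermediate lists are built.
import Mathlib
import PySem

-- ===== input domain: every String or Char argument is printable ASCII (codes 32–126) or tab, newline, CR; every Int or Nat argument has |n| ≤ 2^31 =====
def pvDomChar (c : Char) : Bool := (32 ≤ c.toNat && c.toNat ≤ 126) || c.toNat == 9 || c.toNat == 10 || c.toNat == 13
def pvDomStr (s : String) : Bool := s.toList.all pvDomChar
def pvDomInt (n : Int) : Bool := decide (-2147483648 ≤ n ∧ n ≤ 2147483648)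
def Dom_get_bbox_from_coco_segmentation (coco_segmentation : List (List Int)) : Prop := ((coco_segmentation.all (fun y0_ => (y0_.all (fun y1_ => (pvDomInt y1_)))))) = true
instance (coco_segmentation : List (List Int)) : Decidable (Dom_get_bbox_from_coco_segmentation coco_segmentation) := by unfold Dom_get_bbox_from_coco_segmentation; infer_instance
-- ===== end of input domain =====

-- ===== PORT A =====
-- B replaces A's "build xs/ys via slices, then min/max each list" with one streaming
-- pass keeping four running extrema and a per-segment parity flag (alternative; same O(n) time, O(1) extra space).
-- pvEvens/pvOdds are hand ports of segm[::2] / segm[1::2] (step-2 slice over the whole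
-- list, nonnegative step): exact for every list.
def pvEvens : List Int → List Int
  | [] => []
  | [a] => [a]
  | a :: _ :: t => a :: pvEvens t

def pvOdds : List Int → List Int
  | [] => []
  | [_] => []
  | _ :: b :: t => b :: pvOdds t

def get_bbox_from_coco_segmentation (coco_segmentation : List (List Int)) : Option (List Int) :=
  let p := coco_segmentation.foldl
    (fun (p : List Int × List Int) segm => (p.1 ++ pvEvens segm, p.2 ++ pvOdds segm)) ([], [])
  if p.1.length = 0 ∨ p.2.length = 0 then none
  else
    match PySem.List.min? p.1 (fun v => v), PySem.List.max? p.1 (fun v => v),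
          PySem.List.min? p.2 (fun v => v), PySem.List.max? p.2 (fun v => v) with
    | some xmin, some xmax, some ymin, some ymax => some [xmin, ymin, xmax, ymax]
    | _, _, _, _ => none  -- unreachable: the lists are nonempty here

-- ===== PORT B =====
-- "if xmin is None or v < xmin: xmin = v"
def pvUpdMin (o : Option Int) (v : Int) : Option Int :=
  match o with
  | none => some v
  | some m => if v < m then some v else some m

-- "if xmax is None or v > xmax: xmax = v"
def pvUpdMax (o : Option Int) (v : Int) : Option Int :=
  match o with
  | none => some v
  | some m => if v > m then some v else some m

-- the inner "for v in segm" loop of Source B, threading x_turn and (xmin, xmax, ymin, ymax)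
def pvInner : List Int → Bool → Option Int × Option Int × Option Int × Option Int →
    Option Int × Option Int × Option Int × Option Int
  | [], _, st => st
  | v :: t, xTurn, (x1, x2, y1, y2) =>
      if xTurn then pvInner t false (pvUpdMin x1 v, pvUpdMax x2 v, y1, y2)
      else pvInner t true (x1, x2, pvUpdMin y1 v, pvUpdMax y2 v)

def get_bbox_from_coco_segmentation_alt (coco_segmentation : List (List Int)) : Option (List Int) :=
  let st := coco_segmentation.foldl (fun st segm => pvInner segm true st) (none, none, none, none)
  -- Source B: "if xmin is None or ymin is None: return None", else the four values;
  -- xmax (resp. ymax) is None exactly when xmin (resp. ymin) is, so the getD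
  -- defaults are never used
  st.1.bind fun xmin => st.2.2.1.map fun ymin =>
    [xmin, ymin, st.2.1.getD xmin, st.2.2.2.getD ymin]

-- ===== PRECONDITION & SPEC =====
def Spec_get_bbox_from_coco_segmentation (coco_segmentation : List (List Int)) (out : Option (List Int)) : Prop := out = get_bbox_from_coco_segmentation_alt coco_segmentation
instance (coco_segmentation : List (List Int)) (out : Option (List Int)) : Decidable (Spec_get_bbox_from_coco_segmentation coco_segmentation out) := by unfold Spec_get_bbox_from_coco_segmentation; infer_instance

-- ===== CLAIM (what is proved, stated in full; the proofs are below) =====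
def Claim_equal_get_bbox_from_coco_segmentation : Prop := ∀ (coco_segmentation : List (List Int)), Dom_get_bbox_from_coco_segmentation coco_segmentation → Spec_get_bbox_from_coco_segmentation coco_segmentation (get_bbox_from_coco_segmentation coco_segmentation)

-- ===== LEMMAS AND PROOFS =====
lemma pvEvensOdds_cons (t : List Int) : ∀ a : Int,
    pvEvens (a :: t) = a :: pvOdds t ∧ pvOdds (a :: t) = pvEvens t := by
  induction t with
  | nil => intro a; exact ⟨rfl, rfl⟩
  | cons b t ih =>
      intro a
      exact ⟨by show a :: pvEvens t = a :: pvOdds (b :: t); rw [(ih b).2],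
             by show b :: pvOdds t = pvEvens (b :: t); rw [(ih b).1]⟩

lemma pvEvens_cons (a : Int) (t : List Int) : pvEvens (a :: t) = a :: pvOdds t :=
  (pvEvensOdds_cons t a).1

lemma pvOdds_cons (a : Int) (t : List Int) : pvOdds (a :: t) = pvEvens t :=
  (pvEvensOdds_cons t a).2

lemma pvInner_spec (l : List Int) : ∀ x1 x2 y1 y2 : Option Int,
    pvInner l true (x1, x2, y1, y2) =
      ((pvEvens l).foldl pvUpdMin x1, (pvEvens l).foldl pvUpdMax x2,
       (pvOdds l).foldl pvUpdMin y1, (pvOdds l).foldl pvUpdMax y2) ∧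
    pvInner l false (x1, x2, y1, y2) =
      ((pvOdds l).foldl pvUpdMin x1, (pvOdds l).foldl pvUpdMax x2,
       (pvEvens l).foldl pvUpdMin y1, (pvEvens l).foldl pvUpdMax y2) := by
  induction l with
  | nil => intro x1 x2 y1 y2; simp [pvInner, pvEvens, pvOdds]
  | cons a t ih =>
      intro x1 x2 y1 y2
      constructor
      · simp only [pvInner, pvEvens_cons, pvOdds_cons, List.foldl_cons, if_true]
        exact (ih (pvUpdMin x1 a) (pvUpdMax x2 a) y1 y2).2
      · simp only [pvInner, pvEvens_cons, pvOdds_cons, List.foldl_cons, if_false, Bool.false_eq_true]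
        exact (ih x1 x2 (pvUpdMin y1 a) (pvUpdMax y2 a)).1

def pvState (xs ys : List Int) : Option Int × Option Int × Option Int × Option Int :=
  (xs.foldl pvUpdMin none, xs.foldl pvUpdMax none, ys.foldl pvUpdMin none, ys.foldl pvUpdMax none)

lemma pvOuter_spec (cs : List (List Int)) : ∀ xs ys : List Int,
    cs.foldl (fun st segm => pvInner segm true st) (pvState xs ys) =
      pvState (cs.foldl (fun a segm => a ++ pvEvens segm) xs)
              (cs.foldl (fun a segm => a ++ pvOdds segm) ys) := by
  induction cs with
  | nil => intro xs ys; rfl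
  | cons segm rest ih =>
      intro xs ys
      have h := (pvInner_spec segm (xs.foldl pvUpdMin none) (xs.foldl pvUpdMax none)
        (ys.foldl pvUpdMin none) (ys.foldl pvUpdMax none)).1
      simp only [List.foldl_cons]
      rw [show pvInner segm true (pvState xs ys) = pvState (xs ++ pvEvens segm) (ys ++ pvOdds segm) by
        simp [pvState, h, List.foldl_append]]
      exact ih _ _

lemma pvFoldA_pair (cs : List (List Int)) : ∀ xs ys : List Int,
    cs.foldl (fun (p : List Int × List Int) segm => (p.1 ++ pvEvens segm, p.2 ++ pvOdds segm)) (xs, ys)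
      = (cs.foldl (fun a segm => a ++ pvEvens segm) xs, cs.foldl (fun a segm => a ++ pvOdds segm) ys) := by
  induction cs with
  | nil => intro xs ys; rfl
  | cons segm rest ih => intro xs ys; simp only [List.foldl_cons]; exact ih _ _

lemma foldl_pvUpdMin_some (t : List Int) : ∀ m : Int, t.foldl pvUpdMin (some m) = some (t.foldl min m) := by
  induction t with
  | nil => intro m; rfl
  | cons a t ih =>
      intro m
      simp only [List.foldl_cons, pvUpdMin]
      rcases lt_or_ge a m with h | h
      · rw [if_pos h, ih, min_eq_right (le_of_lt h)]
      · rw [if_neg (not_lt.2 h), ih, min_eq_left h]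

lemma foldl_pvUpdMax_some (t : List Int) : ∀ m : Int, t.foldl pvUpdMax (some m) = some (t.foldl max m) := by
  induction t with
  | nil => intro m; rfl
  | cons a t ih =>
      intro m
      simp only [List.foldl_cons, pvUpdMax]
      rcases lt_or_ge m a with h | h
      · rw [if_pos h, ih, max_eq_right (le_of_lt h)]
      · rw [if_neg (not_lt.2 h), ih, max_eq_left h]

lemma foldl_pvUpdMin_eq_min? (xs : List Int) :
    xs.foldl pvUpdMin none = PySem.List.min? xs (fun v => v) := by
  cases xs with
  | nil => rfl
  | cons x t =>
      rw [PySem.List.min?_id_cons]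
      simpa [pvUpdMin] using foldl_pvUpdMin_some t x

lemma foldl_pvUpdMax_eq_max? (xs : List Int) :
    xs.foldl pvUpdMax none = PySem.List.max? xs (fun v => v) := by
  cases xs with
  | nil => rfl
  | cons x t =>
      rw [PySem.List.max?_id_cons]
      simpa [pvUpdMax] using foldl_pvUpdMax_some t x

-- ===== VERDICT (by name: the statement is the Claim_ definition above) =====
theorem get_bbox_from_coco_segmentation_spec : Claim_equal_get_bbox_from_coco_segmentation := by
  intro cs _
  unfold Spec_get_bbox_from_coco_segmentation
  unfold get_bbox_from_coco_segmentation get_bbox_from_coco_segmentation_alt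
  simp only [pvFoldA_pair cs [] []]
  rw [show ((none, none, none, none) : Option Int × Option Int × Option Int × Option Int) = pvState [] [] from rfl,
     pvOuter_spec cs [] []]
  simp only [pvState, foldl_pvUpdMin_eq_min?, foldl_pvUpdMax_eq_max?]
  generalize cs.foldl (fun a segm => a ++ pvEvens segm) [] = xs
  generalize cs.foldl (fun a segm => a ++ pvOdds segm) [] = ys
  have hmin : PySem.List.min? ([] : List Int) (fun v => v) = none := by
    simp [PySem.List.min?_eq_none_iff]
  have hmax : PySem.List.max? ([] : List Int) (fun v => v) = none := by
    simp [PySem.List.max?_eq_none_iff]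
  cases xs with
  | nil => simp [hmin, hmax]
  | cons x t =>
      cases ys with
      | nil =>
          rw [PySem.List.min?_id_cons, PySem.List.max?_id_cons]
          simp [hmin]
      | cons y u =>
          rw [PySem.List.min?_id_cons, PySem.List.max?_id_cons,
              PySem.List.min?_id_cons, PySem.List.max?_id_cons]
          simp
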